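-- pv_equiv track=rewrite | github.com/AndresLizcano228412/ejercicios-pyton | digit-increasing.py | isDigitIncreasing
-- ===== SOURCE A (Python) =====
-- def isDigitIncreasing(numero):
--     for a in range(1, 10):
--       suma=0
--       valor=0
--       for b in range(len(str(numero))):
--          valor = valor * 10 + a
--          suma += valor
--          if suma == numero:
--             return 1
--          if suma > numero:
--                   break
--     return 0
-- ===== SOURCE B (Python) =====
-- def isDigitIncreasing(numero):
--     t = 81 * numero
--     for k in range(1, len(str(numero)) + 1):
--         d = 10 ** (k + 1) - 10 - 9 * k
--         if t % d == 0 and 1 <= t // d <= 9: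
--             return 1
--     return 0
-- ===== Notes on version B (the rewrite author's own statement) =====
-- stated objective: alternative
-- what changed: B drops the outer loop over starting digits and the running valor/suma accumulation entirely: it loops over the term count k only and recovers the starting digit by divisibility, testing whether 81*numero is divisible by 10**(k+1)-10-9*k (= 81 times the k-term sum for digit 1) with quotient in 1..9.
import Mathlib
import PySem

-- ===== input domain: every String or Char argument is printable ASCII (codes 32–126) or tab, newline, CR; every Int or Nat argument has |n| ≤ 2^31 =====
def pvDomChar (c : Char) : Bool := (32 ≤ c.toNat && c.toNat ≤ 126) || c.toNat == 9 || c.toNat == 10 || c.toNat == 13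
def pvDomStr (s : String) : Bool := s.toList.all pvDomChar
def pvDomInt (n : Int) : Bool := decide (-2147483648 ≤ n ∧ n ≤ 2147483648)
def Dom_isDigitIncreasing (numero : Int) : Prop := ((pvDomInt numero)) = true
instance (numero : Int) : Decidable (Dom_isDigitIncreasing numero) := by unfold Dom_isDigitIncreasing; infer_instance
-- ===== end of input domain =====

-- B loops over the term count k only and recovers the starting digit a by divisibility (81*numero % (10^(k+1)-10-9k) == 0 with quotient in 1..9), replacing A's digit-loop with per-digit accumulation (alternative algorithm, same cost class).


-- ===== PORT A =====
-- inner loop: 'for b in range(n)' carrying (valor, suma); true = early 'return 1', false = loop ends or breaks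
def innerA (numero a : Int) : Nat → Int → Int → Bool
  | 0, _, _ => false
  | n + 1, valor, suma =>
    let valor' := valor * 10 + a
    let suma' := suma + valor'
    if suma' = numero then true
    else if suma' > numero then false
    else innerA numero a n valor' suma'

-- outer loop: 'for a in range(1, 10)'
def outerA (numero : Int) (L : Nat) : List Int → Int
  | [] => 0
  | a :: rest => if innerA numero a L 0 0 then 1 else outerA numero L rest

def isDigitIncreasing (numero : Int) : Int :=
  outerA numero (PySem.Int.toStr numero).length (PySem.List.pyRange 1 10 1)

-- ===== PORT B =====
-- 'for k in range(1, L+1)': fuel n, current k as Nat (so 10 ** (k+1) is Python's power with nonnegative exponent)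
def loopB (t : Int) : Nat → Nat → Int
  | _, 0 => 0
  | k, n + 1 =>
    let d := (10 : Int) ^ (k + 1) - 10 - 9 * (k : Int)
    if PySem.Int.mod t d = 0 ∧ 1 ≤ PySem.Int.floordiv t d ∧ PySem.Int.floordiv t d ≤ 9 then 1
    else loopB t (k + 1) n

def isDigitIncreasing_alt (numero : Int) : Int :=
  loopB (81 * numero) 1 (PySem.Int.toStr numero).length

-- ===== PRECONDITION & SPEC =====
def Spec_isDigitIncreasing (numero : Int) (out : Int) : Prop := out = isDigitIncreasing_alt numero
instance (numero : Int) (out : Int) : Decidable (Spec_isDigitIncreasing numero out) := by unfold Spec_isDigitIncreasing; infer_instance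

-- ===== CLAIM (what is proved, stated in full; the proofs are below) =====
def Claim_equal_isDigitIncreasing : Prop := ∀ (numero : Int), Dom_isDigitIncreasing numero → Spec_isDigitIncreasing numero (isDigitIncreasing numero)

-- ===== LEMMAS AND PROOFS =====

-- repunit repu k = 11…1 (k ones) and repS k = repu 1 + … + repu k, as integers
def repu : Nat → Int
  | 0 => 0
  | k + 1 => 10 * repu k + 1

def repS : Nat → Int
  | 0 => 0
  | k + 1 => repS k + repu (k + 1)

theorem repu_nonneg (k : Nat) : 0 ≤ repu k := by
  induction k with
  | zero => simp [repu]
  | succ k ih => simp only [repu]; linarith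

theorem repS_mono {k j : Nat} (h : k ≤ j) : repS k ≤ repS j := by
  induction j with
  | zero => interval_cases k; simp
  | succ j ih =>
    rcases Nat.lt_or_ge k (j + 1) with h' | h'
    · have := ih (Nat.lt_succ_iff.mp h')
      simp only [repS, repu]
      have := repu_nonneg j
      linarith
    · have : k = j + 1 := le_antisymm h h'
      simp [this]

theorem repS_pos {j : Nat} (h : 1 ≤ j) : 1 ≤ repS j := by
  have h1 : repS 1 ≤ repS j := repS_mono h
  simp only [repS, repu] at h1
  linarith

theorem nine_repu (k : Nat) : 9 * repu k + 1 = (10 : Int) ^ k := by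
  induction k with
  | zero => simp [repu]
  | succ k ih => simp only [repu, pow_succ]; linarith

theorem closed_repS (k : Nat) : (10 : Int) ^ (k + 1) - 10 - 9 * (k : Int) = 81 * repS k := by
  induction k with
  | zero => simp [repS]
  | succ k ih =>
    have h9 := nine_repu (k + 1)
    simp only [repS]
    push_cast
    rw [pow_succ (10 : Int) (k + 1)]
    linarith

-- A's inner loop, from state (a*repu k, a*repS k), finds exactly the sums a*repS j for k < j ≤ k+n
theorem innerA_iff (numero a : Int) (ha : 1 ≤ a) (n : Nat) :
    ∀ k : Nat, innerA numero a n (a * repu k) (a * repS k) = true ↔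
      ∃ j : Nat, k < j ∧ j ≤ k + n ∧ a * repS j = numero := by
  induction n with
  | zero =>
    intro k
    simp only [innerA]
    constructor
    · intro h; cases h
    · rintro ⟨j, h1, h2, _⟩; omega
  | succ n ih =>
    intro k
    have hv : a * repu k * 10 + a = a * repu (k + 1) := by simp only [repu]; ring
    have hs : a * repS k + a * repu (k + 1) = a * repS (k + 1) := by simp only [repS]; ring
    simp only [innerA, hv, hs]
    by_cases h1 : a * repS (k + 1) = numero
    · simp only [h1]
      constructor
      · intro _; exact ⟨k + 1, by omega, by omega, h1⟩
      · intro _; rfl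
    · rw [if_neg h1]
      by_cases h2 : a * repS (k + 1) > numero
      · rw [if_pos h2]
        constructor
        · intro h; cases h
        · rintro ⟨j, hj1, hj2, hj3⟩
          exfalso
          have hm : repS (k + 1) ≤ repS j := repS_mono (by omega)
          have : a * repS (k + 1) ≤ a * repS j :=
            mul_le_mul_of_nonneg_left hm (by linarith)
          linarith
      · rw [if_neg h2, ih (k + 1)]
        constructor
        · rintro ⟨j, hj1, hj2, hj3⟩; exact ⟨j, by omega, by omega, hj3⟩
        · rintro ⟨j, hj1, hj2, hj3⟩
          have hne : j ≠ k + 1 := by rintro rfl; exact h1 hj3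
          exact ⟨j, by omega, by omega, hj3⟩

theorem innerA_zero_iff (numero a : Int) (ha : 1 ≤ a) (n : Nat) :
    innerA numero a n 0 0 = true ↔ ∃ j : Nat, 1 ≤ j ∧ j ≤ n ∧ a * repS j = numero := by
  have := innerA_iff numero a ha n 0
  simpa [repu, repS] using this

-- A's outer loop returns 1 iff some a in the list succeeds, else 0
theorem outerA_one_iff (numero : Int) (L : Nat) (as : List Int) :
    outerA numero L as = 1 ↔ ∃ a ∈ as, innerA numero a L 0 0 = true := by
  induction as with
  | nil => simp [outerA]
  | cons a rest ih =>
    simp only [outerA]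
    by_cases h : innerA numero a L 0 0 = true
    · simp [h]
    · simp [h, ih]

theorem outerA_mem (numero : Int) (L : Nat) (as : List Int) :
    outerA numero L as = 0 ∨ outerA numero L as = 1 := by
  induction as with
  | nil => left; rfl
  | cons a rest ih =>
    simp only [outerA]
    by_cases h : innerA numero a L 0 0 = true
    · simp [h]
    · simpa [h] using ih

-- B's per-k test is exactly "some digit a in 1..9 has a * repS k = numero" (for k ≥ 1)
theorem condB_iff (numero : Int) (k : Nat) (hk : 1 ≤ k) :
    (PySem.Int.mod (81 * numero) ((10 : Int) ^ (k + 1) - 10 - 9 * (k : Int)) = 0 ∧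
     1 ≤ PySem.Int.floordiv (81 * numero) ((10 : Int) ^ (k + 1) - 10 - 9 * (k : Int)) ∧
     PySem.Int.floordiv (81 * numero) ((10 : Int) ^ (k + 1) - 10 - 9 * (k : Int)) ≤ 9)
    ↔ ∃ a : Int, 1 ≤ a ∧ a ≤ 9 ∧ a * repS k = numero := by
  rw [closed_repS]
  have hS : 1 ≤ repS k := repS_pos hk
  have hd : (0 : Int) < 81 * repS k := by linarith
  rw [PySem.Int.mod_eq_zero_iff_dvd, PySem.Int.floordiv_eq_ediv_of_pos hd]
  constructor
  · rintro ⟨⟨m, hm⟩, h1, h2⟩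
    have hq : 81 * numero / (81 * repS k) = m := by
      rw [hm]; exact Int.mul_ediv_cancel_left m (by linarith)
    rw [hq] at h1 h2
    refine ⟨m, h1, h2, ?_⟩
    have : 81 * numero = 81 * (m * repS k) := by rw [hm]; ring
    linarith [mul_left_cancel₀ (by norm_num : (81:Int) ≠ 0) this]
  · rintro ⟨a, h1, h2, h3⟩
    have ht : 81 * numero = 81 * repS k * a := by rw [← h3]; ring
    refine ⟨⟨a, ht⟩, ?_, ?_⟩ <;>
      rw [ht, Int.mul_ediv_cancel_left a (by linarith)] <;> assumption

theorem loopB_one_iff (numero : Int) (n : Nat) :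
    ∀ k : Nat, 1 ≤ k →
      (loopB (81 * numero) k n = 1 ↔
        ∃ j : Nat, k ≤ j ∧ j < k + n ∧ ∃ a : Int, 1 ≤ a ∧ a ≤ 9 ∧ a * repS j = numero) := by
  induction n with
  | zero =>
    intro k hk
    simp only [loopB]
    constructor
    · intro h; cases h
    · rintro ⟨j, h1, h2, _⟩; omega
  | succ n ih =>
    intro k hk
    simp only [loopB]
    by_cases hc : PySem.Int.mod (81 * numero) ((10 : Int) ^ (k + 1) - 10 - 9 * (k : Int)) = 0 ∧
        1 ≤ PySem.Int.floordiv (81 * numero) ((10 : Int) ^ (k + 1) - 10 - 9 * (k : Int)) ∧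
        PySem.Int.floordiv (81 * numero) ((10 : Int) ^ (k + 1) - 10 - 9 * (k : Int)) ≤ 9
    · rw [if_pos hc]
      have := (condB_iff numero k hk).mp hc
      exact ⟨fun _ => ⟨k, le_refl k, by omega, this⟩, fun _ => rfl⟩
    · rw [if_neg hc, ih (k + 1) (by omega)]
      constructor
      · rintro ⟨j, h1, h2, hj⟩; exact ⟨j, by omega, by omega, hj⟩
      · rintro ⟨j, h1, h2, hj⟩
        refine ⟨j, ?_, by omega, hj⟩
        rcases Nat.lt_or_ge k j with h' | h'
        · omega
        · exfalso
          have : j = k := by omega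
          exact hc ((condB_iff numero k hk).mpr (this ▸ hj))

theorem loopB_mem (t : Int) (n : Nat) : ∀ k, loopB t k n = 0 ∨ loopB t k n = 1 := by
  induction n with
  | zero => intro k; left; rfl
  | succ n ih =>
    intro k
    simp only [loopB]
    split
    · right; rfl
    · exact ih (k + 1)

-- ===== VERDICT (by name: the statement is the Claim_ definition above) =====
theorem isDigitIncreasing_spec : Claim_equal_isDigitIncreasing := by
  intro numero _
  unfold Spec_isDigitIncreasing isDigitIncreasing isDigitIncreasing_alt
  set L := (PySem.Int.toStr numero).length with hL
  have hA := outerA_mem numero L (PySem.List.pyRange 1 10 1)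
  have hB := loopB_mem (81 * numero) L 1
  have hiff : outerA numero L (PySem.List.pyRange 1 10 1) = 1 ↔ loopB (81 * numero) 1 L = 1 := by
    rw [outerA_one_iff, loopB_one_iff numero L 1 (le_refl 1)]
    constructor
    · rintro ⟨a, hmem, hin⟩
      have hrange := (PySem.List.mem_pyRange_one).mp hmem
      obtain ⟨j, hj1, hj2, hj3⟩ := (innerA_zero_iff numero a (by omega) L).mp hin
      exact ⟨j, hj1, by omega, a, by omega, by omega, hj3⟩
    · rintro ⟨j, hj1, hj2, a, ha1, ha2, hj3⟩
      refine ⟨a, (PySem.List.mem_pyRange_one).mpr ⟨by omega, by omega⟩, ?_⟩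
      exact (innerA_zero_iff numero a ha1 L).mpr ⟨j, hj1, by omega, hj3⟩
  rcases hA with h0 | h1
  · rcases hB with g0 | g1
    · rw [h0, g0]
    · exact absurd (hiff.mpr g1) (by rw [h0]; norm_num)
  · rw [h1, hiff.mp h1]
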